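-- pv_equiv track=rewrite | github.com/dminhvu/CompetitiveProgramming | CompetitiveProgramming/Codeforces/1364A.py | calc
-- ===== SOURCE A (Python) =====
-- def calc(a,n,m):
--     ans = -1
--     for i in range(n):
--         if i != 0:
--             a[i] += a[i - 1]
--         a[i] %= m
--         if a[i] != 0:
--             ans = max(ans, i + 1)
--     return ans
-- ===== SOURCE B (Python) =====
-- def calc(a, n, m):
--     # suffix-sum algorithm: S_i = total - (a[i+1] + ... + a[n-1]); no prefix array, no mutation of a
--     total = sum(a[:n])
--     suffix = 0
--     for i in range(n - 1, -1, -1):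
--         if (total - suffix) % m != 0:
--             return i + 1
--         suffix += a[i]
--     return -1
-- ===== Notes on version B (the rewrite author's own statement) =====
-- stated objective: faster
-- what changed: Instead of building prefix sums (A mutates a in place and tracks a running max), B computes the total once and scans from the right maintaining a suffix-sum accumulator, returning at the first index where (total - suffix) % m != 0 via the identity S_i = total - suffix(i+1); B never mutates a (the equivalence is about the return value).
import Mathlib
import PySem

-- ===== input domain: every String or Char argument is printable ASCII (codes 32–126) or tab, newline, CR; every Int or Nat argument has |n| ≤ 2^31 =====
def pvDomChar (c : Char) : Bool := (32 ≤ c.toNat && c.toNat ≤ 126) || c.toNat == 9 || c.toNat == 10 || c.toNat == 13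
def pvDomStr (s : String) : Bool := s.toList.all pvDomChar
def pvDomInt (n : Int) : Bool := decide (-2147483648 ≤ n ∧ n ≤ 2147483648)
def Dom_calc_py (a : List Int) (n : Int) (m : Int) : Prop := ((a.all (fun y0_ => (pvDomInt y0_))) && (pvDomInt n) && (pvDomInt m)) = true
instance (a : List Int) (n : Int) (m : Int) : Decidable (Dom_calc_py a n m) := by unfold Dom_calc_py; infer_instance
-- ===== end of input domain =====

-- B replaces A's in-place prefix-sum pass with a running max by one total sum plus a
-- right-to-left scan with a suffix-sum accumulator (S_i = total - suffix), returning at the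
-- first nonzero residue.  B does not mutate `a` (A does); the theorem is about the return value.

-- ===== PORT A =====
-- loop body of A's single for-loop; state = (the mutated list, ans)
def calcStepA (m : Int) (st : List Int × Int) (i : Int) : List Int × Int :=
  let arr := st.1
  let arr := if i ≠ 0 then PySem.List.pySetD arr i (PySem.List.pyGetD arr i 0 + PySem.List.pyGetD arr (i - 1) 0) else arr
  let arr := PySem.List.pySetD arr i (PySem.Int.mod (PySem.List.pyGetD arr i 0) m)
  let ans := if PySem.List.pyGetD arr i 0 ≠ 0 then max st.2 (i + 1) else st.2
  (arr, ans)

def calc_py (a : List Int) (n : Int) (m : Int) : Int :=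
  ((PySem.List.pyRange 0 n 1).foldl (calcStepA m) (a, -1)).2

-- ===== PORT B =====
-- B's for-loop: early return i+1 at the first i (right to left) with (total - suffix) % m != 0,
-- else accumulate suffix += a[i]; -1 when the loop finishes
def calcAltLoop (a : List Int) (m : Int) (total : Int) : Int → List Int → Int
  | _, [] => -1
  | s, i :: rest =>
    if PySem.Int.mod (total - s) m ≠ 0 then i + 1
    else calcAltLoop a m total (s + PySem.List.pyGetD a i 0) rest

def calc_py_alt (a : List Int) (n : Int) (m : Int) : Int :=
  let total := (PySem.List.slice a none (some n)).sum
  calcAltLoop a m total 0 (PySem.List.pyRange (n - 1) (-1) (-1))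

-- ===== PRECONDITION & SPEC =====
-- Pre_ excludes exactly the inputs where the Python A raises: IndexError when n > len(a),
-- and ZeroDivisionError when the loop runs (0 < n) with m = 0.
def Pre_calc_py (a : List Int) (n : Int) (m : Int) : Prop :=
  n ≤ (a.length : Int) ∧ (n ≤ 0 ∨ m ≠ 0)
instance (a : List Int) (n : Int) (m : Int) : Decidable (Pre_calc_py a n m) := by unfold Pre_calc_py; infer_instance
def pvWitness_calc_py : List Int × Int × Int := ([3, 4, 5], 3, 2)

def Spec_calc_py (a : List Int) (n : Int) (m : Int) (out : Int) : Prop := out = calc_py_alt a n m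
instance (a : List Int) (n : Int) (m : Int) (out : Int) : Decidable (Spec_calc_py a n m out) := by unfold Spec_calc_py; infer_instance

-- ===== CLAIM (what is proved, stated in full; the proofs are below) =====
def Claim_equal_calc_py : Prop := ∀ (a : List Int) (n : Int) (m : Int), Dom_calc_py a n m → Pre_calc_py a n m → Spec_calc_py a n m (calc_py a n m)

-- ===== LEMMAS AND PROOFS =====

-- proof-side backward scan over an explicit array: the value A's loop state boils down to
def calcAltScan (arr : List Int) : List Int → Int
  | [] => -1
  | i :: rest => if PySem.List.pyGetD arr i 0 ≠ 0 then i + 1 else calcAltScan arr rest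

-- running prefix sum of a up to and including index j
def psum (a : List Int) (j : Nat) : Int := (a.take (j + 1)).sum
-- the array after k steps of A
def mixArr (a : List Int) (m : Int) (k : Nat) : List Int :=
  a.mapIdx (fun j x => if j < k then Int.fmod (psum a j) m else x)

theorem pymod_eq_fmod (a m : Int) : PySem.Int.mod a m = Int.fmod a m := rfl

theorem length_mixArr (a : List Int) (m : Int) (k : Nat) : (mixArr a m k).length = a.length := by
  simp [mixArr]

theorem mixArr_zero (a : List Int) (m : Int) : mixArr a m 0 = a := by
  apply List.ext_getElem (by simp [length_mixArr])
  intro i h1 h2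
  simp [mixArr, List.getElem_mapIdx]

theorem psum_succ (a : List Int) (j : Nat) (h : j + 1 < a.length) :
    psum a (j + 1) = psum a j + a[j + 1] := by
  simp [psum, List.take_add_one, List.getElem?_eq_getElem h]
  ring

theorem getElem_mixArr (a : List Int) (m : Int) (k j : Nat) (h : j < a.length) :
    (mixArr a m k)[j]'(by simpa [length_mixArr] using h) = if j < k then Int.fmod (psum a j) m else a[j] := by
  simp [mixArr, List.getElem_mapIdx]

theorem pyGetD_mixArr (a : List Int) (m : Int) (k j : Nat) (h : j < a.length) :
    PySem.List.pyGetD (mixArr a m k) (j : Int) 0 = if j < k then Int.fmod (psum a j) m else a[j] := by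
  rw [PySem.List.pyGetD_natCast, List.getD_eq_getElem _ _ (by simpa [length_mixArr] using h),
    getElem_mixArr a m k j h]

theorem mixArr_succ (a : List Int) (m : Int) (k : Nat) (h : k < a.length) :
    mixArr a m (k + 1) = (mixArr a m k).set k (Int.fmod (psum a k) m) := by
  apply List.ext_getElem (by simp [length_mixArr])
  intro i h1 h2
  have hi : i < a.length := by simpa [length_mixArr] using h1
  rw [getElem_mixArr a m (k + 1) i hi, List.getElem_set]
  rcases eq_or_ne k i with rfl | hne
  · simp
  · rw [if_neg hne, getElem_mixArr a m k i hi]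
    by_cases hik : i < k
    · rw [if_pos hik, if_pos (by omega)]
    · rw [if_neg hik, if_neg (by omega)]

-- backward-scan bound: every index in l gives at most c, and the default -1 is ≤ c
theorem calcAltScan_le (arr l : List Int) (c : Int) (h : ∀ i ∈ l, i + 1 ≤ c) (hc : -1 ≤ c) :
    calcAltScan arr l ≤ c := by
  induction l with
  | nil => simpa [calcAltScan] using hc
  | cons i rest ih =>
    rw [calcAltScan]
    split_ifs
    · exact h i (by simp)
    · exact ih (fun j hj => h j (by simp [hj]))

-- backward scan only looks at the listed indices
theorem calcAltScan_congr (arr arr' l : List Int)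
    (h : ∀ i ∈ l, PySem.List.pyGetD arr i 0 = PySem.List.pyGetD arr' i 0) :
    calcAltScan arr l = calcAltScan arr' l := by
  induction l with
  | nil => rfl
  | cons i rest ih =>
    rw [calcAltScan, calcAltScan, h i (by simp), ih (fun j hj => h j (by simp [hj]))]

-- A's loop invariant
theorem loopA_eq (a : List Int) (m : Int) (p : Nat) (hp : p ≤ a.length) :
    (PySem.List.pyRange 0 (p : Int) 1).foldl (calcStepA m) (a, -1)
      = (mixArr a m p, calcAltScan (mixArr a m p) (PySem.List.pyRange ((p : Int) - 1) (-1) (-1))) := by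
  induction p with
  | zero =>
    rw [Nat.cast_zero, PySem.List.pyRange_one_eq_nil (le_refl 0), List.foldl_nil, mixArr_zero,
      (by norm_num : (0 : Int) - 1 = -1), PySem.List.pyRange_neg_one_eq_nil (le_refl (-1))]
    rfl
  | succ q ih =>
    have hq : q < a.length := by omega
    have hc : ((q + 1 : Nat) : Int) = (q : Int) + 1 := by push_cast; ring
    rw [hc, PySem.List.pyRange_one_succ_right (by exact_mod_cast Nat.zero_le q),
      List.foldl_append, List.foldl_cons, List.foldl_nil, ih (by omega)]
    have hrange : PySem.List.pyRange ((q : Int) + 1 - 1) (-1) (-1)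
        = (q : Int) :: PySem.List.pyRange ((q : Int) - 1) (-1) (-1) := by
      rw [(by ring : (q : Int) + 1 - 1 = (q : Int)),
        PySem.List.pyRange_neg_one_cons (by omega : (-1 : Int) < (q : Int))]
    have key : ∀ s : Int, calcStepA m (mixArr a m q, s) ((q : Int))
        = (mixArr a m (q + 1),
           if PySem.List.pyGetD (mixArr a m (q + 1)) ((q : Int)) 0 ≠ 0 then max s ((q : Int) + 1) else s) := by
      intro s
      rcases Nat.eq_zero_or_pos q with rfl | hq0
      · simp only [calcStepA, Nat.cast_zero]
        rw [if_neg (by simp : ¬ ((0 : Int) ≠ 0))]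
        have e2 : psum a 0 = a[0]'hq := by
          simp [psum, List.take_one, List.head?_eq_getElem?, List.getElem?_eq_getElem hq]
        have e1 : PySem.List.pyGetD (mixArr a m 0) (0 : Int) 0 = a[0]'hq := by
          rw [mixArr_zero, PySem.List.pyGetD_zero, List.getD_eq_getElem _ _ hq]
        have e3 : PySem.List.pySetD (mixArr a m 0) (0 : Int) (PySem.Int.mod (a[0]'hq) m)
            = mixArr a m 1 := by
          rw [mixArr_succ a m 0 hq, e2, pymod_eq_fmod]
          simp [pysem]
        rw [e1, e3]
      · obtain ⟨t, rfl⟩ : ∃ t : Nat, q = t + 1 := ⟨q - 1, by omega⟩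
        simp only [calcStepA]
        rw [if_pos (by exact_mod_cast Nat.succ_ne_zero t : ((t + 1 : Nat) : Int) ≠ 0),
          (by push_cast; ring : ((t + 1 : Nat) : Int) - 1 = ((t : Nat) : Int))]
        rw [pyGetD_mixArr a m (t + 1) (t + 1) hq, if_neg (lt_irrefl _),
          pyGetD_mixArr a m (t + 1) t (by omega), if_pos (by omega)]
        simp only [PySem.List.pySetD_natCast]
        have hlen : t + 1 < ((mixArr a m (t + 1)).set (t + 1) (a[t + 1]'hq + Int.fmod (psum a t) m)).length := by
          simp [length_mixArr]; omega
        have harr : ((mixArr a m (t + 1)).set (t + 1) (a[t + 1]'hq + Int.fmod (psum a t) m)).set (t + 1)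
            (PySem.Int.mod (((mixArr a m (t + 1)).set (t + 1) (a[t + 1]'hq + Int.fmod (psum a t) m)).getD (t + 1) 0) m)
            = mixArr a m (t + 1 + 1) := by
          rw [List.getD_eq_getElem _ _ hlen, List.getElem_set_self, List.set_set, pymod_eq_fmod,
            Int.add_fmod_fmod, add_comm (a[t + 1]'hq) (psum a t), ← psum_succ a t hq,
            ← mixArr_succ a m (t + 1) hq]
        simp only [PySem.List.pyGetD_natCast]
        rw [harr]
    rw [key, hrange, calcAltScan]
    refine Prod.ext rfl ?_
    split_ifs with hcond
    · refine max_eq_right ?_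
      refine le_trans (calcAltScan_le _ _ ((q : Int)) ?_ (by omega)) (by omega)
      intro i hi
      have := (PySem.List.mem_pyRange_neg_one).1 hi
      omega
    · refine calcAltScan_congr _ _ _ ?_
      intro i hi
      have hmem := (PySem.List.mem_pyRange_neg_one).1 hi
      obtain ⟨u, rfl⟩ : ∃ u : Nat, i = (u : Int) := ⟨i.toNat, (Int.toNat_of_nonneg (by omega)).symm⟩
      have hu : u < q := by exact_mod_cast (by omega : (u : Int) < (q : Int))
      rw [pyGetD_mixArr a m q u (by omega), pyGetD_mixArr a m (q + 1) u (by omega),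
        if_pos hu, if_pos (by omega)]

-- B's suffix-sum loop agrees with the backward scan of A's final array:
-- with suffix invariant total - s = psum a k, both return the same on the range k,k-1,…,0
theorem loopB_eq (a : List Int) (m total : Int) (p : Nat) (hp : p ≤ a.length)
    (k : Nat) (hk : k < p) :
    ∀ s : Int, total - s = psum a k →
      calcAltLoop a m total s (PySem.List.pyRange (k : Int) (-1) (-1))
        = calcAltScan (mixArr a m p) (PySem.List.pyRange (k : Int) (-1) (-1)) := by
  induction k with
  | zero =>
    intro s hs
    rw [Nat.cast_zero,
      PySem.List.pyRange_neg_one_cons (by norm_num : (-1 : Int) < 0),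
      PySem.List.pyRange_neg_one_eq_nil (by norm_num : (0 : Int) - 1 ≤ -1)]
    have hg := pyGetD_mixArr a m p 0 (by omega)
    rw [Nat.cast_zero, if_pos hk] at hg
    rw [calcAltLoop, calcAltScan, hs, pymod_eq_fmod, hg]
    split_ifs <;> rfl
  | succ q ih =>
    intro s hs
    have hq1 : q + 1 < a.length := by omega
    have hc : ((q + 1 : Nat) : Int) = (q : Int) + 1 := by push_cast; ring
    rw [hc, PySem.List.pyRange_neg_one_cons (by omega : (-1 : Int) < (q : Int) + 1),
      (by ring : (q : Int) + 1 - 1 = (q : Int))]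
    rw [calcAltLoop, calcAltScan, hs, pymod_eq_fmod, ← hc,
      pyGetD_mixArr a m p (q + 1) hq1, if_pos hk, hc]
    split_ifs with hcond
    · rfl
    · refine ih (by omega) _ ?_
      rw [← hc, PySem.List.pyGetD_natCast, List.getD_eq_getElem _ _ hq1]
      have := psum_succ a q hq1
      omega

-- ===== VERDICT (by name: the statement is the Claim_ definition above) =====
theorem calc_py_spec : Claim_equal_calc_py := by
  intro a n m _ hpre
  unfold Spec_calc_py
  rcases (by omega : n ≤ 0 ∨ 0 < n) with hn | hn
  · show _ = calcAltLoop _ _ _ _ _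
    rw [PySem.List.pyRange_neg_one_eq_nil (by omega : n - 1 ≤ -1)]
    simp [calc_py, PySem.List.pyRange_one_eq_nil hn, calcAltLoop]
  · have hn0 : 0 ≤ n := le_of_lt hn
    obtain ⟨p, rfl⟩ : ∃ p : Nat, n = (p : Int) := ⟨n.toNat, (Int.toNat_of_nonneg hn0).symm⟩
    have hp : p ≤ a.length := by exact_mod_cast hpre.1
    have hp0 : 0 < p := by exact_mod_cast hn
    obtain ⟨k, rfl⟩ : ∃ k : Nat, p = k + 1 := ⟨p - 1, by omega⟩
    have htot : (PySem.List.slice a none (some ((k + 1 : Nat) : Int))).sum = psum a k := by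
      rw [PySem.List.slice_to_natCast]
      rfl
    have hcast : ((k + 1 : Nat) : Int) - 1 = (k : Nat) := by push_cast; ring
    show _ = calcAltLoop _ _ _ _ _
    rw [htot, hcast, calc_py, loopA_eq a m (k + 1) hp,
      loopB_eq a m (psum a k) (k + 1) hp k (by omega) 0 (by ring), hcast]
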